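-- pv_equiv track=rewrite | github.com/jainul75/bioinformatics_exercise-python | Week 02/genome_nucleotide_array_count.py | SymbolArray
-- ===== SOURCE A (Python) =====
-- def PatternCount(Text, Pattern):
--     count = 0   # initialize count of pattern occurrences
--     for i in range(len(Text) - len(Pattern) + 1):
--         if Text[i:i+len(Pattern)] == Pattern:  # check if substring matches the pattern
--             count += 1                         # increment count if a match is found
--     return count
--
-- def SymbolArray(Genome, symbol):
--     array = {}       # empty dictionary to store counts at each position
--     n = len(Genome)  # length of the genome
--
--     # extend genome by adding the first half to the end to handle circularity, ex - AAAAGGGG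
--     ExtendedGenome = Genome + Genome[0:n//2]    # after adding first half - AAAAGGGGAAAA
--
--     for i in range(n):
--         window = ExtendedGenome[i:i + (n//2)]   # take a window of length n/2 starting at position i
--         array[i] = PatternCount(window, symbol) # count how many times the symbol appears in that window
--     return array
-- ===== SOURCE B (Python) =====
-- def SymbolArray(Genome, symbol):
--     n = len(Genome)
--     L = n // 2
--     ExtendedGenome = Genome + Genome[0:L]
--     m = len(symbol)
--     array = {}
--     if m > L:
--         # symbol cannot fit in a window of length n//2: every count is 0
--         for i in range(n):
--             array[i] = 0
--         return array
--     # prefix[k] = number of occurrences of symbol starting at positions < k of ExtendedGenome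
--     prefix = [0]
--     for j in range(len(ExtendedGenome) - m + 1):
--         prefix.append(prefix[-1] + (1 if ExtendedGenome[j:j + m] == symbol else 0))
--     for i in range(n):
--         array[i] = prefix[i + L - m + 1] - prefix[i]
--     return array
-- ===== Notes on version B (the rewrite author's own statement) =====
-- stated objective: faster
-- what changed: B builds one prefix-sum table of symbol match positions over the extended genome and reads each window count as a difference of two table entries, instead of A's rescan of every length-n/2 window with PatternCount.
import Mathlib
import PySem

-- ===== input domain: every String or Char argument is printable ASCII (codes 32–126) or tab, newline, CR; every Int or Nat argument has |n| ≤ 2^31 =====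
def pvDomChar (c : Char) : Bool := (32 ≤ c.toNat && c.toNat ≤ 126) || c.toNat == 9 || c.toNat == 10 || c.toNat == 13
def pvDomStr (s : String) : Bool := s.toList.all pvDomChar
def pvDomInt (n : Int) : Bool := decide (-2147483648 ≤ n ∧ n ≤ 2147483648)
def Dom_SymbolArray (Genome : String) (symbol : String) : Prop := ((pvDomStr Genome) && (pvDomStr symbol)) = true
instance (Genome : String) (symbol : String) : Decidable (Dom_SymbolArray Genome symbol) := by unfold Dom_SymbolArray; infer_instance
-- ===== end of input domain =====

-- B replaces A's per-window rescan by a single prefix-sum table of symbol matches; return values proved equal on all inputs.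

-- ===== PORT A =====
def PatternCount (Text : String) (Pattern : String) : Int :=
  (PySem.List.pyRange 0 (PySem.Str.len Text - PySem.Str.len Pattern + 1)).foldl
    (fun count i =>
      if PySem.Str.slice Text (some i) (some (i + PySem.Str.len Pattern)) = Pattern then count + 1
      else count) 0

def SymbolArray (Genome : String) (symbol : String) : List (Int × Int) :=
  let n := PySem.Str.len Genome
  let ExtendedGenome := Genome ++ PySem.Str.slice Genome (some 0) (some (PySem.Int.floordiv n 2))
  ((PySem.List.pyRange 0 n).foldl
    (fun array i =>
      array.insert i
        (PatternCount (PySem.Str.slice ExtendedGenome (some i) (some (i + PySem.Int.floordiv n 2))) symbol))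
    (PySem.Dict.empty : PySem.Dict Int Int)).items

-- ===== PORT B =====
-- prefix[k] = number of matches of symbol starting at positions < k of ExtendedGenome; each window count is a
-- difference of two prefix entries.  Python's prefix[-1] / prefix[idx] indices are always in range here, so
-- pyGetD (whose default is never used) is exact for Source B's list indexing.
def SymbolArray_alt (Genome : String) (symbol : String) : List (Int × Int) :=
  let n := PySem.Str.len Genome
  let L := PySem.Int.floordiv n 2
  let ExtendedGenome := Genome ++ PySem.Str.slice Genome (some 0) (some L)
  let m := PySem.Str.len symbol
  if m > L then
    ((PySem.List.pyRange 0 n).foldl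
      (fun array i => array.insert i 0)
      (PySem.Dict.empty : PySem.Dict Int Int)).items
  else
    let pre := (PySem.List.pyRange 0 (PySem.Str.len ExtendedGenome - m + 1)).foldl
      (fun P j =>
        P ++ [PySem.List.pyGetD P (-1) 0 +
          (if PySem.Str.slice ExtendedGenome (some j) (some (j + m)) = symbol then (1 : Int) else 0)])
      [(0 : Int)]
    ((PySem.List.pyRange 0 n).foldl
      (fun array i =>
        array.insert i (PySem.List.pyGetD pre (i + L - m + 1) 0 - PySem.List.pyGetD pre i 0))
      (PySem.Dict.empty : PySem.Dict Int Int)).items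

-- ===== PRECONDITION & SPEC =====
def Spec_SymbolArray (Genome : String) (symbol : String) (out : List (Int × Int)) : Prop := out = SymbolArray_alt Genome symbol
instance (Genome : String) (symbol : String) (out : List (Int × Int)) : Decidable (Spec_SymbolArray Genome symbol out) := by unfold Spec_SymbolArray; infer_instance

-- ===== CLAIM (what is proved, stated in full; the proofs are below) =====
def Claim_equal_SymbolArray : Prop := ∀ (Genome : String) (symbol : String), Dom_SymbolArray Genome symbol → Spec_SymbolArray Genome symbol (SymbolArray Genome symbol)

-- ===== LEMMAS AND PROOFS =====

/-- match of `p` at position `j` of `e` -/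
def pvMatch (e p : List Char) (j : Nat) : Bool := List.take p.length (List.drop j e) == p

/-- number of matches of `p` starting at positions `< k` of `e` -/
def pvCnt (e p : List Char) (k : Nat) : Int := (List.countP (pvMatch e p) (List.range k) : Int)

lemma pv_slice_cond (E symbol : String) (j : Nat) :
    (PySem.Str.slice E (some (j : Int)) (some ((j : Int) + PySem.Str.len symbol)) = symbol)
      ↔ pvMatch E.toList symbol.toList j = true := by
  rw [String.ext_iff, PySem.Str.toList_slice, PySem.Chars.slice_eq_listSlice, PySem.Str.len_eq]
  rw [show ((j : Int) + (symbol.toList.length : Int)) = ((j + symbol.toList.length : Nat) : Int) by push_cast; ring]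
  rw [PySem.List.slice_natCast]
  simp [pvMatch]

lemma pv_align (e : List Char) (i L k m : Nat) (h2 : k + m ≤ L) :
    List.take m (List.drop k (List.take L (List.drop i e))) = List.take m (List.drop (i + k) e) := by
  rw [List.drop_take, List.drop_drop, List.take_take]
  congr 1; omega

lemma pv_cnt_sub (e p : List Char) (a c : Nat) :
    pvCnt e p (a + c) - pvCnt e p a
      = ((List.range c).countP (fun k => pvMatch e p (a + k)) : Int) := by
  simp [pvCnt, List.range_add, List.countP_append, List.countP_map, Function.comp_def]

lemma pv_getD_last (f : Nat → Int) (K : Nat) :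
    PySem.List.pyGetD ((List.range (K+1)).map f) (-1) 0 = f K := by
  simp [PySem.List.pyGetD, PySem.List.pyGet?, PySem.List.pyIdx?]

lemma pv_prefix_eq (E symbol : String) :
    ((PySem.List.pyRange 0 (PySem.Str.len E - PySem.Str.len symbol + 1)).foldl
      (fun P j =>
        P ++ [PySem.List.pyGetD P (-1) 0 +
          (if PySem.Str.slice E (some j) (some (j + PySem.Str.len symbol)) = symbol then (1 : Int) else 0)])
      [(0 : Int)])
    = (List.range ((PySem.Str.len E - PySem.Str.len symbol + 1).toNat + 1)).map
        (pvCnt E.toList symbol.toList) := by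
  rw [PySem.List.pyRange_one, sub_zero]
  generalize (PySem.Str.len E - PySem.Str.len symbol + 1).toNat = K
  induction K with
  | zero => simp [pvCnt]
  | succ K ih =>
      rw [List.range_succ, List.map_append, List.foldl_append, ih]
      simp only [List.map_cons, List.map_nil, List.foldl_cons, List.foldl_nil]
      rw [pv_getD_last]
      rw [show (List.range (K + 1 + 1)) = List.range (K+1) ++ [K+1] from List.range_succ]
      rw [List.map_append]
      congr 1
      simp only [List.map_cons, List.map_nil, List.cons.injEq, and_true]
      rw [show ((0:Int) + (K:Int)) = ((K:Nat) : Int) by ring]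
      by_cases h : pvMatch E.toList symbol.toList K = true
      · rw [if_pos ((pv_slice_cond E symbol K).mpr h)]
        simp [pvCnt, List.range_succ, List.countP_append, h]
      · rw [if_neg (fun hc => h ((pv_slice_cond E symbol K).mp hc))]
        simp [pvCnt, List.range_succ, List.countP_append, h]

lemma pv_window_toList (E : String) (i L : Nat) :
    (PySem.Str.slice E (some (i : Int)) (some ((i : Int) + (L : Int)))).toList
      = List.take L (List.drop i E.toList) := by
  rw [PySem.Str.toList_slice, PySem.Chars.slice_eq_listSlice,
    show ((i : Int) + (L : Int)) = ((i + L : Nat) : Int) by push_cast; ring,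
    PySem.List.slice_natCast]
  congr 1; omega

lemma pv_patternCount_eq (E symbol : String) (i L : Nat) (hiL : i + L ≤ E.toList.length) :
    PatternCount (PySem.Str.slice E (some (i : Int)) (some ((i : Int) + (L : Int)))) symbol
      = ((List.range (((L : Int) - (symbol.toList.length : Int) + 1).toNat)).countP
          (fun k => pvMatch E.toList symbol.toList (i + k)) : Int) := by
  have hw := pv_window_toList E i L
  have hlen : (PySem.Str.slice E (some (i : Int)) (some ((i : Int) + (L : Int)))).toList.length = L := by
    rw [hw, List.length_take, List.length_drop]; omega
  unfold PatternCount
  rw [show (fun (count : Int) j =>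
        if PySem.Str.slice (PySem.Str.slice E (some (i : Int)) (some ((i : Int) + (L : Int))))
            (some j) (some (j + PySem.Str.len symbol)) = symbol then count + 1 else count)
      = (fun (count : Int) j =>
        if (fun j => decide (PySem.Str.slice (PySem.Str.slice E (some (i : Int)) (some ((i : Int) + (L : Int))))
            (some j) (some (j + PySem.Str.len symbol)) = symbol)) j = true then count + 1 else count) from by
        funext c j; simp]
  rw [PySem.List.foldl_count_if, PySem.List.pyRange_one, sub_zero, List.countP_map]
  simp only [PySem.Str.len_eq]
  rw [hlen, zero_add]
  congr 1
  apply List.countP_congr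
  intro k hk
  simp only [List.mem_range] at hk
  have hm : k + symbol.toList.length ≤ L := by omega
  simp only [Function.comp_apply, zero_add]
  have hcond := pv_slice_cond (PySem.Str.slice E (some (i : Int)) (some ((i : Int) + (L : Int)))) symbol k
  unfold pvMatch at hcond ⊢
  rw [hw, pv_align E.toList i L k symbol.toList.length hm] at hcond
  simp only [PySem.Str.len_eq, String.length_toList] at hcond ⊢
  rw [decide_eq_true_eq]
  exact hcond

-- ===== VERDICT (by name: the statement is the Claim_ definition above) =====
theorem SymbolArray_spec : Claim_equal_SymbolArray := by
  intro Genome symbol _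
  unfold Spec_SymbolArray
  have hn := PySem.Str.len_eq Genome
  have hp := PySem.Str.len_eq symbol
  have hL : PySem.Int.floordiv (PySem.Str.len Genome) 2 = ((Genome.toList.length / 2 : Nat) : Int) := by
    rw [hn]; exact_mod_cast PySem.Int.floordiv_natCast Genome.toList.length 2
  have hE : (Genome ++ PySem.Str.slice Genome (some 0) (some (PySem.Int.floordiv (PySem.Str.len Genome) 2))).toList
      = Genome.toList ++ List.take (Genome.toList.length / 2) Genome.toList := by
    rw [String.toList_append, PySem.Str.toList_slice, PySem.Chars.slice_eq_listSlice, hL,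
      PySem.List.slice_zero_start, PySem.List.slice_to_natCast]
  have hlenE : (Genome ++ PySem.Str.slice Genome (some 0) (some (PySem.Int.floordiv (PySem.Str.len Genome) 2))).toList.length
      = Genome.toList.length + Genome.toList.length / 2 := by
    rw [hE, List.length_append, List.length_take]
    omega
  have hEs : PySem.Str.len (Genome ++ PySem.Str.slice Genome (some 0) (some (PySem.Int.floordiv (PySem.Str.len Genome) 2)))
      = ((Genome.toList.length + Genome.toList.length / 2 : Nat) : Int) := by
    rw [PySem.Str.len_eq, hlenE]
  simp only [SymbolArray, SymbolArray_alt]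
  by_cases hm : symbol.toList.length ≤ Genome.toList.length / 2
  · rw [if_neg (by rw [hp, hL]; simp only [gt_iff_lt, not_lt]; exact_mod_cast hm)]
    rw [PySem.Dict.items_foldl_insert_fresh _ (fun i => i) _ _ (fun a _ => rfl) (by simpa using PySem.List.nodup_pyRange_one 0 (PySem.Str.len Genome))]
    rw [PySem.Dict.items_foldl_insert_fresh _ (fun i => i) _ _ (fun a _ => rfl) (by simpa using PySem.List.nodup_pyRange_one 0 (PySem.Str.len Genome))]
    simp only [PySem.Dict.empty, List.nil_append]
    apply List.map_congr_left
    intro i hi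
    rcases PySem.List.mem_pyRange_one.mp hi with ⟨h0, hlt⟩
    obtain ⟨ii, rfl⟩ : ∃ ii : Nat, i = ↑ii := ⟨i.toNat, (Int.toNat_of_nonneg h0).symm⟩
    have hii : ii < Genome.toList.length := by rw [hn] at hlt; exact_mod_cast hlt
    have hiL : ii + Genome.toList.length / 2
        ≤ (Genome ++ PySem.Str.slice Genome (some 0) (some (PySem.Int.floordiv (PySem.Str.len Genome) 2))).toList.length := by
      rw [hlenE]; omega
    rw [pv_prefix_eq]
    congr 1
    rw [hL] at hiL hEs ⊢
    rw [pv_patternCount_eq _ symbol ii (Genome.toList.length / 2) hiL]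
    simp only [hEs, hp]
    have hK : (((Genome.toList.length + Genome.toList.length / 2 : Nat) : Int) - (symbol.toList.length : Int) + 1).toNat
        = Genome.toList.length + Genome.toList.length / 2 - symbol.toList.length + 1 := by omega
    rw [hK]
    have hidx : ((ii : Int) + ((Genome.toList.length / 2 : Nat) : Int) - (symbol.toList.length : Int) + 1)
        = ((ii + (Genome.toList.length / 2 - symbol.toList.length + 1) : Nat) : Int) := by omega
    rw [hidx, PySem.List.pyGetD_natCast, PySem.List.pyGetD_natCast,
      PySem.List.getD_map_range _ _ _ _ (by omega), PySem.List.getD_map_range _ _ _ _ (by omega),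
      pv_cnt_sub]
    have hr : ((↑(Genome.toList.length / 2) : Int) - (↑symbol.toList.length : Int) + 1).toNat
        = Genome.toList.length / 2 - symbol.toList.length + 1 := by omega
    rw [hr]
  · rw [if_pos (by rw [hp, hL]; simp only [gt_iff_lt]; exact_mod_cast Nat.lt_of_not_le (fun h => hm h))]
    rw [PySem.Dict.items_foldl_insert_fresh _ (fun i => i) _ _ (fun a _ => rfl) (by simpa using PySem.List.nodup_pyRange_one 0 (PySem.Str.len Genome))]
    rw [PySem.Dict.items_foldl_insert_fresh _ (fun i => i) _ _ (fun a _ => rfl) (by simpa using PySem.List.nodup_pyRange_one 0 (PySem.Str.len Genome))]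
    simp only [PySem.Dict.empty, List.nil_append]
    apply List.map_congr_left
    intro i hi
    rcases PySem.List.mem_pyRange_one.mp hi with ⟨h0, hlt⟩
    obtain ⟨ii, rfl⟩ : ∃ ii : Nat, i = ↑ii := ⟨i.toNat, (Int.toNat_of_nonneg h0).symm⟩
    have hii : ii < Genome.toList.length := by rw [hn] at hlt; exact_mod_cast hlt
    have hiL : ii + Genome.toList.length / 2
        ≤ (Genome ++ PySem.Str.slice Genome (some 0) (some (PySem.Int.floordiv (PySem.Str.len Genome) 2))).toList.length := by
      rw [hlenE]; omega
    congr 1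
    rw [hL] at hiL ⊢
    rw [pv_patternCount_eq _ symbol ii (Genome.toList.length / 2) hiL]
    have h0' : (((Genome.toList.length / 2 : Nat) : Int) - (symbol.toList.length : Int) + 1).toNat = 0 := by omega
    rw [h0']
    simp
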